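-- pv_equiv track=rewrite | github.com/lancefreidrick/dashboard-test | backend/server/utilities/helper.py | transform_dict_to_list
-- ===== SOURCE A (Python) =====
-- def transform_key_to_name(key: str) -> str:
--     if not key:
--         return None
--
--     name = key[0].upper()
--     for character in key[1:]:
--         if character.isupper():
--             name += ' ' + character.lower()
--         else:
--             name += character.lower()
--     return name
--
-- def transform_dict_to_list(data: dict):
--     return [
--         {
--             'value': data[key],
--             'name': key,
--             'text': transform_key_to_name(key)
--         } for key in data or {}
--     ]
-- ===== SOURCE B (Python) =====
-- def transform_key_to_name(key: str) -> str:
--     if not key: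
--         return None
--     # split into "words" at uppercase letters, then lowercase-join and capitalize
--     parts = []
--     current = key[0]
--     for character in key[1:]:
--         if character.isupper():
--             parts.append(current)
--             current = character
--         else:
--             current += character
--     parts.append(current)
--     text = ' '.join(p.lower() for p in parts)
--     return text[:1].upper() + text[1:]
--
-- def transform_dict_to_list(data: dict):
--     if not data:
--         return []
--     return [
--         {'value': value, 'name': key, 'text': transform_key_to_name(key)}
--         for key, value in data.items()
--     ]
-- ===== Notes on version B (the rewrite author's own statement) =====
-- stated objective: alternative
-- what changed: transform_key_to_name is rebuilt as a word-splitting pipeline (split the key into words at uppercase letters, lowercase-join with spaces, then capitalize the first character) instead of A's per-character case-dispatching string accumulation.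
import Mathlib
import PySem

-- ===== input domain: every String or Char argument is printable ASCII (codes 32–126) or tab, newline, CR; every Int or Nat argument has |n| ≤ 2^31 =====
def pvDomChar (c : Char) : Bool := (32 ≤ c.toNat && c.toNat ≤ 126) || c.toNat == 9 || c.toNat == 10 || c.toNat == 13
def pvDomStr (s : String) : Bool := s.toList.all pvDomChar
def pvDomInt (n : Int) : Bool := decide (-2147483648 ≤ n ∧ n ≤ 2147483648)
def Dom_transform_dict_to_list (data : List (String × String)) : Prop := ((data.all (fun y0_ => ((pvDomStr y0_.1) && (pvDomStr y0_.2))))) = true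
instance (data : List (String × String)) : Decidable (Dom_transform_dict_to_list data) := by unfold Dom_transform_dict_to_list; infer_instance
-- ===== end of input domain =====

-- B rebuilds transform_key_to_name as a word-split / lowercase-join / capitalize pipeline instead of
-- A's per-character case-dispatching accumulation; same asymptotic cost (objective: alternative).


-- ===== PORT A =====
-- Python's transform_key_to_name returns None on an empty key (excluded by Pre_); `none` here.
def transform_key_to_name (key : String) : Option String :=
  match key.toList with
  | [] => none                       -- `if not key: return None`
  | c :: rest =>                     -- name = key[0].upper(); then the per-character loop
    some (String.mk (rest.foldl (fun name ch =>
      if PySem.Chars.isupper ch then name ++ [' ', PySem.Chars.lowerChar ch]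
      else name ++ [PySem.Chars.lowerChar ch]) [PySem.Chars.upperChar c]))

-- `.getD ""` only gives the Option a String shape; keys are nonempty under Pre_, so it is never used there.
def transform_dict_to_list (data : List (String × String)) : List (List (String × String)) :=
  (PySem.Dict.ofList data).items.map (fun kv =>
    [("value", kv.2), ("name", kv.1), ("text", (transform_key_to_name kv.1).getD "")])

-- ===== PORT B =====
def transform_key_to_name_alt (key : String) : Option String :=
  match key.toList with
  | [] => none                       -- `if not key: return None`
  | c :: rest =>
    -- parts/current loop: split into words at uppercase letters
    let st := rest.foldl (fun (acc : List (List Char) × List Char) ch =>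
      if PySem.Chars.isupper ch then (acc.1 ++ [acc.2], [ch])
      else (acc.1, acc.2 ++ [ch])) ([], [c])
    -- text = ' '.join(p.lower() for p in parts);  return text[:1].upper() + text[1:]
    let text := PySem.Chars.join [' '] ((st.1 ++ [st.2]).map PySem.Chars.lower)
    some (String.mk (PySem.Chars.upper (PySem.List.slice text none (some 1)) ++
                     PySem.List.slice text (some 1) none))

def transform_dict_to_list_alt (data : List (String × String)) : List (List (String × String)) :=
  let d := PySem.Dict.ofList data
  if d.items.isEmpty then []         -- `if not data: return []`
  else d.items.map (fun kv =>
    [("value", kv.2), ("name", kv.1), ("text", (transform_key_to_name_alt kv.1).getD "")])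

-- ===== PRECONDITION & SPEC =====
-- Pre_ excludes inputs containing an empty-string key: there A returns a dict whose 'text' field is
-- None, which is not a value of the declared str type (B does the same).
def Pre_transform_dict_to_list (data : List (String × String)) : Prop :=
  ∀ p ∈ data, p.1 ≠ ""
instance (data : List (String × String)) : Decidable (Pre_transform_dict_to_list data) := by unfold Pre_transform_dict_to_list; infer_instance
def pvWitness_transform_dict_to_list : (List (String × String)) := [("fooBar", "1"), ("baz", "2")]

def Spec_transform_dict_to_list (data : List (String × String)) (out : List (List (String × String))) : Prop := out = transform_dict_to_list_alt data
instance (data : List (String × String)) (out : List (List (String × String))) : Decidable (Spec_transform_dict_to_list data out) := by unfold Spec_transform_dict_to_list; infer_instance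

-- ===== CLAIM (what is proved, stated in full; the proofs are below) =====
def Claim_equal_transform_dict_to_list : Prop := ∀ (data : List (String × String)), Dom_transform_dict_to_list data → Pre_transform_dict_to_list data → Spec_transform_dict_to_list data (transform_dict_to_list data)

-- ===== LEMMAS AND PROOFS =====

lemma char_le_iff (a b : Char) : (a ≤ b) ↔ a.toNat ≤ b.toNat :=
  ⟨fun h => Fin.mk_le_mk.mp h, fun h => Fin.mk_le_mk.mpr h⟩

lemma upperChar_lowerChar (c : Char) :
    PySem.Chars.upperChar (PySem.Chars.lowerChar c) = PySem.Chars.upperChar c := by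
  by_cases h : 'A' ≤ c ∧ c ≤ 'Z'
  · have h1 : 65 ≤ c.toNat := (char_le_iff _ _).mp h.1
    have h2 : c.toNat ≤ 90 := (char_le_iff _ _).mp h.2
    have hlow : PySem.Chars.lowerChar c = Char.ofNat (c.toNat + 32) := by
      simp [PySem.Chars.lowerChar, PySem.Chars.isupper, h.1, h.2]
    have htn : (Char.ofNat (c.toNat + 32)).toNat = c.toNat + 32 := by
      rw [Char.toNat_ofNat, if_pos]; exact Or.inl (by omega)
    have ha97 : ('a' : Char).toNat = 97 := rfl
    have hz122 : ('z' : Char).toNat = 122 := rfl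
    have hla : 'a' ≤ Char.ofNat (c.toNat + 32) := (char_le_iff _ _).mpr (by rw [htn, ha97]; omega)
    have hlz : Char.ofNat (c.toNat + 32) ≤ 'z' := (char_le_iff _ _).mpr (by rw [htn, hz122]; omega)
    have hnl : ¬ ('a' ≤ c) := by rw [char_le_iff, ha97]; omega
    rw [hlow]
    simp [PySem.Chars.upperChar, PySem.Chars.islower, hla, hlz, htn, hnl]
  · have hlow : PySem.Chars.lowerChar c = c := by
      simp [PySem.Chars.lowerChar, PySem.Chars.isupper]
      intro h1 h2; exact absurd ⟨h1, h2⟩ h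
    rw [hlow]

lemma join_append_singleton (sep y : List Char) : ∀ (xs : List (List Char)), xs ≠ [] →
    PySem.Chars.join sep (xs ++ [y]) = PySem.Chars.join sep xs ++ sep ++ y
  | [], h => absurd rfl h
  | [a], _ => by
      simp [PySem.Chars.join_cons_cons, PySem.Chars.join_singleton]
  | a :: b :: l, _ => by
      rw [List.cons_append, List.cons_append, PySem.Chars.join_cons_cons]
      rw [← List.cons_append, join_append_singleton sep y (b :: l) (by simp)]
      rw [PySem.Chars.join_cons_cons]
      simp [List.append_assoc]

lemma join_last_append (sep y z : List Char) : ∀ (xs : List (List Char)),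
    PySem.Chars.join sep (xs ++ [y ++ z]) = PySem.Chars.join sep (xs ++ [y]) ++ z
  | [] => by simp [PySem.Chars.join_singleton]
  | a :: l => by
      rcases l with _ | ⟨b, l⟩
      · simp [PySem.Chars.join_cons_cons, PySem.Chars.join_singleton, List.append_assoc]
      · have ih := join_last_append sep y z (b :: l)
        simp only [List.cons_append] at ih ⊢
        rw [PySem.Chars.join_cons_cons, PySem.Chars.join_cons_cons, ih]
        simp [List.append_assoc]

-- the tail A's loop appends for one character
def gA (ch : Char) : List Char :=
  if PySem.Chars.isupper ch then [' ', PySem.Chars.lowerChar ch] else [PySem.Chars.lowerChar ch]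

-- B's word state, flattened through the lowercase join
def joinT (st : List (List Char) × List Char) : List Char :=
  PySem.Chars.join [' '] ((st.1 ++ [st.2]).map PySem.Chars.lower)

lemma foldB_joinT : ∀ (rest : List Char) (parts : List (List Char)) (cur : List Char),
    joinT (rest.foldl (fun (acc : List (List Char) × List Char) ch =>
      if PySem.Chars.isupper ch then (acc.1 ++ [acc.2], [ch])
      else (acc.1, acc.2 ++ [ch])) (parts, cur)) = joinT (parts, cur) ++ rest.flatMap gA
  | [], parts, cur => by simp
  | ch :: rest, parts, cur => by
      rw [List.foldl_cons, List.flatMap_cons]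
      by_cases h : PySem.Chars.isupper ch
      · rw [if_pos h]
        rw [foldB_joinT rest (parts ++ [cur]) [ch]]
        have : joinT (parts ++ [cur], [ch]) = joinT (parts, cur) ++ gA ch := by
          unfold joinT gA
          rw [if_pos h]
          simp only [List.map_append, List.map_cons, List.map_nil, List.append_assoc]
          rw [← List.append_assoc,
              join_append_singleton [' '] (PySem.Chars.lower [ch])
                (List.map PySem.Chars.lower parts ++ [PySem.Chars.lower cur]) (by simp)]
          simp [PySem.Chars.lower, List.append_assoc]
        rw [this, List.append_assoc]
      · rw [if_neg h]
        rw [foldB_joinT rest parts (cur ++ [ch])]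
        have : joinT (parts, cur ++ [ch]) = joinT (parts, cur) ++ gA ch := by
          unfold joinT gA
          rw [if_neg h]
          simp only [List.map_append, List.map_cons, List.map_nil]
          have hl : PySem.Chars.lower (cur ++ [ch]) = PySem.Chars.lower cur ++ [PySem.Chars.lowerChar ch] := by
            simp [PySem.Chars.lower]
          rw [hl, join_last_append [' '] (PySem.Chars.lower cur) [PySem.Chars.lowerChar ch]
                (parts.map PySem.Chars.lower)]
        rw [this, List.append_assoc]

lemma tkn_eq (key : String) : transform_key_to_name key = transform_key_to_name_alt key := by
  unfold transform_key_to_name transform_key_to_name_alt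
  cases hk : key.toList with
  | nil => rfl
  | cons c rest =>
    simp only []
    have hf : (fun (name : List Char) (ch : Char) =>
        if PySem.Chars.isupper ch then name ++ [' ', PySem.Chars.lowerChar ch]
        else name ++ [PySem.Chars.lowerChar ch]) = (fun acc ch => acc ++ gA ch) := by
      funext a ch; unfold gA; split_ifs <;> rfl
    rw [hf, PySem.List.foldl_append_eq_flatMap]
    have hb := foldB_joinT rest [] [c]
    have hstart : joinT ([], [c]) = [PySem.Chars.lowerChar c] := by
      simp [joinT, PySem.Chars.join_singleton, PySem.Chars.lower]
    rw [hstart] at hb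
    show _ = some (String.mk (PySem.Chars.upper (PySem.List.slice (joinT _) none (some 1)) ++
        PySem.List.slice (joinT _) (some 1) none))
    rw [hb]
    simp [PySem.List.slice, PySem.Chars.upper, upperChar_lowerChar]
    rw [← List.length_flatMap, List.take_length]


-- ===== VERDICT (by name: the statement is the Claim_ definition above) =====
theorem transform_dict_to_list_spec : Claim_equal_transform_dict_to_list := by
  intro data _ _
  unfold Spec_transform_dict_to_list transform_dict_to_list transform_dict_to_list_alt
  simp only [tkn_eq]
  by_cases h : (PySem.Dict.ofList data).items.isEmpty
  · simp [List.isEmpty_iff.mp h]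
  · simp [h]
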